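-- pv_equiv track=rewrite | github.com/nivelnola/Empath | Empath_Counter.py | count
-- ===== SOURCE A (Python) =====
-- def count(file, emotion):
--     count = 0
--     for line in file:
--         words = line.lower().split()
--         for word in words :
--             if word in emotion:
--                 count += 1
--     return (count)
-- ===== SOURCE B (Python) =====
-- def count(file, emotion):
--     freq = {}
--     for line in file:
--         for word in line.lower().split():
--             freq[word] = freq.get(word, 0) + 1
--     total = 0
--     for w in set(emotion):
--         total += freq.get(w, 0)
--     return total
-- ===== Notes on version B (the rewrite author's own statement) =====
-- stated objective: alternative
-- what changed: Instead of testing list membership for every word as it is scanned, B tabulates word frequencies into a dict in one pass over the file and then sums the tabulated counts over the distinct emotion words.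
import Mathlib
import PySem

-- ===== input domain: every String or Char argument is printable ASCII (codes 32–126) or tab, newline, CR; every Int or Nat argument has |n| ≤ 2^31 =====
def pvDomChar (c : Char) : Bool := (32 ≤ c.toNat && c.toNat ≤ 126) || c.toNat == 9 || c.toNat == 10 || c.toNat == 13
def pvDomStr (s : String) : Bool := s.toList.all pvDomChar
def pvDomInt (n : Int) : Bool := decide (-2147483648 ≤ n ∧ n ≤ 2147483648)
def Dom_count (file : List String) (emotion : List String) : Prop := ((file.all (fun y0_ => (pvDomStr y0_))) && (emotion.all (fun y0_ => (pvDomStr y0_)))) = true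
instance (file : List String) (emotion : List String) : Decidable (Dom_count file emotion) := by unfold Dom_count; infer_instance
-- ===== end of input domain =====

-- B tabulates word frequencies in one pass, then sums the counts over the distinct emotion words,
-- instead of A's per-word membership test against the emotion list (objective: alternative).

-- ===== PORT A =====
def count (file : List String) (emotion : List String) : Int :=
  file.foldl (fun c line =>
    (PySem.Str.split₀ (PySem.Str.lower line)).foldl
      (fun c word => if emotion.contains word then c + 1 else c) c) 0

-- ===== PORT B =====
def count_alt (file : List String) (emotion : List String) : Int :=
  let freq := file.foldl (fun d line =>
      (PySem.Str.split₀ (PySem.Str.lower line)).foldl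
        (fun d word => d.modify word 0 (· + 1)) d)
    PySem.Dict.empty
  (PySem.Set.ofList emotion).foldl (fun t w => t + freq.getD w 0) 0

-- ===== PRECONDITION & SPEC =====
def Spec_count (file : List String) (emotion : List String) (out : Int) : Prop := out = count_alt file emotion
instance (file : List String) (emotion : List String) (out : Int) : Decidable (Spec_count file emotion out) := by unfold Spec_count; infer_instance

-- ===== CLAIM (what is proved, stated in full; the proofs are below) =====
def Claim_equal_count : Prop := ∀ (file : List String) (emotion : List String), Dom_count file emotion → Spec_count file emotion (count file emotion)

-- ===== LEMMAS AND PROOFS =====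

-- the word stream both programs traverse
def pvWords (file : List String) : List String :=
  file.flatMap (fun line => PySem.Str.split₀ (PySem.Str.lower line))

-- A counts the words (in flattened order) that lie in `emotion`
theorem count_eq_countP (file emotion : List String) :
    count file emotion = ((pvWords file).countP (fun w => emotion.contains w) : Int) := by
  suffices h : ∀ (c : Int), file.foldl (fun c line =>
      (PySem.Str.split₀ (PySem.Str.lower line)).foldl
        (fun c word => if emotion.contains word then c + 1 else c) c) c
      = c + ((pvWords file).countP (fun w => emotion.contains w) : Int) by
    simpa [count] using h 0
  induction file with
  | nil => intro c; simp [pvWords]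
  | cons l rest ih =>
    intro c
    rw [List.foldl_cons, ih, PySem.List.foldl_count_if]
    simp only [pvWords, List.flatMap_cons, List.countP_append]
    push_cast
    ring

-- B's dict is a counter of the word stream
theorem freq_getD (file : List String) (d : PySem.Dict String Int) (w : String) :
    (file.foldl (fun d line =>
      (PySem.Str.split₀ (PySem.Str.lower line)).foldl
        (fun d word => d.modify word 0 (· + 1)) d) d).getD w 0
    = d.getD w 0 + ((pvWords file).count w : Int) := by
  induction file generalizing d with
  | nil => simp [pvWords]
  | cons l rest ih =>
    simp only [List.foldl_cons, ih, PySem.Dict.getD_foldl_modify_add_one, pvWords,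
      List.flatMap_cons, List.count_append]
    push_cast
    ring

-- summing counts over a duplicate-free list = counting members
theorem sum_indicator (S : List String) (x : String) (hS : S.Nodup) :
    (S.map (fun w => if x == w then (1 : Int) else 0)).sum
      = if S.contains x then 1 else 0 := by
  induction S with
  | nil => simp
  | cons s S ih =>
    rcases List.nodup_cons.mp hS with ⟨hs, hS'⟩
    rw [List.map_cons, List.sum_cons, ih hS']
    by_cases hx : x = s
    · subst hx
      simpa using hs
    · simp [hx]

theorem sum_counts (S ws : List String) (hS : S.Nodup) :
    (S.map (fun w => (ws.count w : Int))).sum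
      = (ws.countP (fun x => S.contains x) : Int) := by
  induction ws with
  | nil => simp
  | cons x ws ih =>
    have hcount : ∀ w : String, ((x :: ws).count w : Int)
        = (ws.count w : Int) + (if x == w then (1 : Int) else 0) := by
      intro w; rw [List.count_cons]; split <;> push_cast <;> ring
    calc (S.map (fun w => ((x :: ws).count w : Int))).sum
        = (S.map (fun w => (ws.count w : Int) + (if x == w then (1:Int) else 0))).sum := by
          simp only [hcount]
      _ = (S.map (fun w => (ws.count w : Int))).sum
            + (S.map (fun w => if x == w then (1:Int) else 0)).sum := by
          rw [← List.sum_map_add]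
      _ = (ws.countP (fun x => S.contains x) : Int) + (if S.contains x then 1 else 0) := by
          rw [ih, sum_indicator S x hS]
      _ = ((x :: ws).countP (fun x => S.contains x) : Int) := by
          rw [List.countP_cons]; split <;> push_cast <;> ring

-- ===== VERDICT (by name: the statement is the Claim_ definition above) =====
theorem count_spec : Claim_equal_count := by
  intro file emotion _
  unfold Spec_count count_alt
  rw [count_eq_countP]
  rw [PySem.List.foldl_add]
  simp only [freq_getD, PySem.Dict.getD_empty, zero_add]
  rw [sum_counts _ _ (PySem.Set.nodup_ofList emotion)]
  congr 1
  apply List.countP_congr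
  intro w _
  simp [PySem.Set.mem_ofList]
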